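-- pv_equiv track=rewrite | github.com/neurokinetikz/research | scripts/run_lemon_raw_extraction.py | get_condition_segments
-- ===== SOURCE A (Python) =====
-- MARKER_EO = 'S210'   # Eyes-open condition
--
-- MARKER_EC = 'S200'   # Eyes-closed condition
--
-- def get_condition_segments(markers, condition='EO', sfreq_raw=2500):
--     """Extract contiguous condition segments from markers.
--
--     Returns list of (start_sample, end_sample) tuples at original sfreq.
--
--     Strategy: identify runs of S210 (EO) or S200 (EC) markers.
--     Each block starts at first condition marker after an S1,
--     ends at last condition marker + inter-marker gap.
--     """
--     target_marker = MARKER_EO if condition == 'EO' else MARKER_EC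
--
--     # Find all positions of the target marker
--     target_positions = [pos for desc, pos in markers if desc == target_marker]
--
--     if not target_positions:
--         return []
--
--     # Group into contiguous blocks: consecutive markers <10s apart
--     max_gap = 10 * sfreq_raw  # 10 seconds
--     blocks = []
--     block_start = target_positions[0]
--     prev_pos = target_positions[0]
--
--     for pos in target_positions[1:]:
--         if pos - prev_pos > max_gap:
--             # New block — end previous at prev_pos + typical gap
--             typical_gap = 5000  # ~2 sec at 2500 Hz
--             blocks.append((block_start, prev_pos + typical_gap))
--             block_start = pos
--         prev_pos = pos
--
--     # Close final block
--     typical_gap = 5000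
--     blocks.append((block_start, prev_pos + typical_gap))
--
--     return blocks
-- ===== SOURCE B (Python) =====
-- MARKER_EO = 'S210'
-- MARKER_EC = 'S200'
--
-- def get_condition_segments(markers, condition='EO', sfreq_raw=2500):
--     """Two-pass rewrite: first find the break indices, then slice into segments."""
--     target_marker = MARKER_EO if condition == 'EO' else MARKER_EC
--     pos = [p for desc, p in markers if desc == target_marker]
--     if not pos:
--         return []
--     max_gap = 10 * sfreq_raw
--     breaks = [i for i in range(1, len(pos)) if pos[i] - pos[i - 1] > max_gap]
--     bounds = [0] + breaks + [len(pos)]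
--     return [(pos[a], pos[b - 1] + 5000) for a, b in zip(bounds, bounds[1:])]
-- ===== Notes on version B (the rewrite author's own statement) =====
-- stated objective: alternative
-- what changed: Replaces A's single accumulator loop (carrying blocks/block_start/prev_pos) with two separate passes: first compute the list of break indices where consecutive target positions differ by more than max_gap, then map zipped boundary pairs [0]+breaks+[len] to (start, end+5000) segments.
import Mathlib
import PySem

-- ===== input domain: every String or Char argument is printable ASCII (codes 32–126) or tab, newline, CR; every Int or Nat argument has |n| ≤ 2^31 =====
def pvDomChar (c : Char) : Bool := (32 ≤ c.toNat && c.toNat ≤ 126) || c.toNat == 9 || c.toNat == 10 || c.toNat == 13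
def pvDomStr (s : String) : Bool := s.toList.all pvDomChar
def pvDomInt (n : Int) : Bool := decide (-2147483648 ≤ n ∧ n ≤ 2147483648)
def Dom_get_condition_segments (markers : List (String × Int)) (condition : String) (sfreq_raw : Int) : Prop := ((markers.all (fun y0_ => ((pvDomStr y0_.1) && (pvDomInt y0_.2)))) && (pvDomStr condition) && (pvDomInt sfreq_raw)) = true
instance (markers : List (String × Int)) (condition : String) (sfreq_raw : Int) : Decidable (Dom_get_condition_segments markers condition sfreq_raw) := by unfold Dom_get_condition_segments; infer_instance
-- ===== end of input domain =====

-- B re-implements A's single accumulator loop as two passes — find break indices, then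
-- slice bounds into segments — an alternative decomposition of the same linear cost.

-- ===== PORT A =====
-- the loop body of A's for-loop; state = (blocks, block_start, prev_pos)
def aStep (max_gap : Int) (st : List (Int × Int) × Int × Int) (pos : Int) :
    List (Int × Int) × Int × Int :=
  if pos - st.2.2 > max_gap then (st.1 ++ [(st.2.1, st.2.2 + 5000)], pos, pos)
  else (st.1, st.2.1, pos)

def get_condition_segments (markers : List (String × Int)) (condition : String) (sfreq_raw : Int) : List (Int × Int) :=
  let target_marker := if condition = "EO" then "S210" else "S200"
  let target_positions := (markers.filter (fun m => m.1 = target_marker)).map Prod.snd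
  match target_positions with
  | [] => []
  | p0 :: rest =>
    let max_gap := 10 * sfreq_raw
    let st := rest.foldl (aStep max_gap) ([], p0, p0)
    st.1 ++ [(st.2.1, st.2.2 + 5000)]

-- ===== PORT B =====
-- `[i for i in range(1, len(pos)) if pos[i] - pos[i-1] > max_gap]`;
-- range(1, len(pos)) = List.range' 1 (pos.length - 1); all indices are in range,
-- so getD is exact for Python's pos[i].
def bBreaks (max_gap : Int) (pos : List Int) : List Nat :=
  (List.range' 1 (pos.length - 1)).filter (fun i => pos.getD i 0 - pos.getD (i - 1) 0 > max_gap)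

-- bounds = [0] + breaks + [len(pos)];  [(pos[a], pos[b-1] + 5000) for a, b in zip(bounds, bounds[1:])]
def bSegments (max_gap : Int) (pos : List Int) : List (Int × Int) :=
  let bounds := 0 :: (bBreaks max_gap pos ++ [pos.length])
  (bounds.zip bounds.tail).map (fun ab => (pos.getD ab.1 0, pos.getD (ab.2 - 1) 0 + 5000))

def get_condition_segments_alt (markers : List (String × Int)) (condition : String) (sfreq_raw : Int) : List (Int × Int) :=
  let target_marker := if condition = "EO" then "S210" else "S200"
  let pos := (markers.filter (fun m => m.1 = target_marker)).map Prod.snd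
  if pos.isEmpty then [] else bSegments (10 * sfreq_raw) pos

-- ===== PRECONDITION & SPEC =====
def Spec_get_condition_segments (markers : List (String × Int)) (condition : String) (sfreq_raw : Int) (out : List (Int × Int)) : Prop := out = get_condition_segments_alt markers condition sfreq_raw
instance (markers : List (String × Int)) (condition : String) (sfreq_raw : Int) (out : List (Int × Int)) : Decidable (Spec_get_condition_segments markers condition sfreq_raw out) := by unfold Spec_get_condition_segments; infer_instance

-- ===== CLAIM (what is proved, stated in full; the proofs are below) =====
def Claim_equal_get_condition_segments : Prop := ∀ (markers : List (String × Int)) (condition : String) (sfreq_raw : Int), Dom_get_condition_segments markers condition sfreq_raw → Spec_get_condition_segments markers condition sfreq_raw (get_condition_segments markers condition sfreq_raw)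

-- ===== LEMMAS AND PROOFS =====

-- reference recursion: segments of the grouping loop, state (block_start = bs, prev)
def segs (g : Int) (bs prev : Int) : List Int → List (Int × Int)
  | [] => [(bs, prev + 5000)]
  | p :: ps => if p - prev > g then (bs, prev + 5000) :: segs g p p ps else segs g bs p ps

-- replace the start of the first segment
def setStart (s : Int) : List (Int × Int) → List (Int × Int)
  | [] => []
  | (_, e) :: t => (s, e) :: t

theorem setStart_setStart (s x : Int) (l : List (Int × Int)) :
    setStart s (setStart x l) = setStart s l := by
  cases l with
  | nil => rfl
  | cons h t => cases h; rfl

theorem foldA (g : Int) (l : List Int) : ∀ (blocks : List (Int × Int)) (bs prev : Int),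
    (let st := l.foldl (aStep g) (blocks, bs, prev); st.1 ++ [(st.2.1, st.2.2 + 5000)]) =
      blocks ++ segs g bs prev l := by
  induction l with
  | nil => intro blocks bs prev; simp [segs]
  | cons p ps ih =>
    intro blocks bs prev
    simp only [List.foldl_cons, aStep, segs]
    by_cases h : p - prev > g
    · simp only [if_pos h]
      have := ih (blocks ++ [(bs, prev + 5000)]) p p
      simp only [] at this
      rw [show ((blocks ++ [(bs, prev + 5000)], p, p) : List (Int × Int) × Int × Int) =
            ((blocks ++ [(bs, prev + 5000)]), p, p) from rfl]
      simpa [List.append_assoc] using this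
    · simp only [if_neg h]
      exact ih blocks bs p

theorem mem_bBreaks_pos (g : Int) (pos : List Int) (i : Nat) (h : i ∈ bBreaks g pos) : 1 ≤ i := by
  have := List.mem_filter.mp h
  exact (List.mem_range'_1.mp this.1).1

-- break-index shift: breaks of p0::q::l are the (possible) break at 1 plus the shifted breaks of q::l
theorem bBreaks_cons (g p0 q : Int) (l : List Int) :
    bBreaks g (p0 :: q :: l) =
      (if q - p0 > g then [1] else []) ++ (bBreaks g (q :: l)).map (· + 1) := by
  unfold bBreaks
  have hr : List.range' 1 (l.length + 1) = 1 :: (List.range' 1 l.length).map (· + 1) := by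
    rw [List.range'_succ]
    congr 1
    have := List.map_add_range' (a := 1) (s := 1) (n := l.length) (step := 1)
    rw [← this]
    exact List.map_congr_left (fun a _ => Nat.add_comm 1 a)
  simp only [List.length_cons, Nat.add_sub_cancel, hr, List.filter_cons]
  have hsh : ((List.range' 1 l.length).map (· + 1)).filter
        (fun i => decide ((p0 :: q :: l).getD i 0 - (p0 :: q :: l).getD (i - 1) 0 > g)) =
      ((List.range' 1 l.length).filter
        (fun i => decide ((q :: l).getD i 0 - (q :: l).getD (i - 1) 0 > g))).map (· + 1) := by
    rw [List.filter_map]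
    congr 1
    apply List.filter_congr
    intro a ha
    obtain ⟨h1, _⟩ := List.mem_range'_1.mp ha
    obtain ⟨c, rfl⟩ := Nat.exists_eq_add_of_le' h1
    simp [List.getD]
  rw [hsh]
  by_cases h : q - p0 > g <;> simp [h]

-- the zipped tail pairs shift down one index onto the tail list
theorem zipmap_shift (p0 : Int) (rest : List Int) (T : List Nat) (hT : ∀ b ∈ T.tail, 1 ≤ b) :
    ((T.map (· + 1)).zip (T.map (· + 1)).tail).map
        (fun ab => ((p0 :: rest).getD ab.1 0, (p0 :: rest).getD (ab.2 - 1) 0 + 5000)) =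
      (T.zip T.tail).map (fun ab => (rest.getD ab.1 0, rest.getD (ab.2 - 1) 0 + 5000)) := by
  rw [← List.map_tail, List.zip_map, List.map_map]
  apply List.map_congr_left
  rintro ⟨a, b⟩ hab
  obtain ⟨_, hb⟩ := List.of_mem_zip hab
  have hb1 : 1 ≤ b := hT b hb
  obtain ⟨c, rfl⟩ := Nat.exists_eq_add_of_le' hb1
  simp [List.getD]

-- bSegments of a nonempty list starts at its head
theorem bSegments_head (g x : Int) (l : List Int) :
    setStart x (bSegments g (x :: l)) = bSegments g (x :: l) := by
  unfold bSegments
  cases h : bBreaks g (x :: l) ++ [(x :: l).length] with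
  | nil => simp at h
  | cons c T => simp [setStart]

theorem bSegments_segs (g : Int) : ∀ (l : List Int) (p0 s : Int),
    setStart s (bSegments g (p0 :: l)) = segs g s p0 l := by
  intro l
  induction l with
  | nil =>
    intro p0 s
    simp [bSegments, bBreaks, segs, setStart]
  | cons q l' ih =>
    intro p0 s
    have hmap : (bBreaks g (q :: l')).map (· + 1) ++ [l'.length + 1 + 1] =
        (bBreaks g (q :: l') ++ [l'.length + 1]).map (· + 1) := by simp
    have hlen : (q :: l').length = l'.length + 1 := rfl
    have hall : ∀ b ∈ bBreaks g (q :: l') ++ [l'.length + 1], 1 ≤ b := by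
      intro b hb
      rcases List.mem_append.mp hb with h | h
      · exact mem_bBreaks_pos g _ b h
      · simp at h; omega
    by_cases hgap : q - p0 > g
    · -- break right after p0: first segment is (p0, p0+5000), the rest shift by one
      have hb : bSegments g (p0 :: q :: l') = (p0, p0 + 5000) :: bSegments g (q :: l') := by
        unfold bSegments
        rw [bBreaks_cons, if_pos hgap]
        simp only [List.cons_append, List.nil_append, List.length_cons]
        rw [hmap]
        have hzip := zipmap_shift p0 (q :: l')
            (0 :: (bBreaks g (q :: l') ++ [l'.length + 1])) (by simpa using hall)
        simp only [List.map_cons, List.tail_cons] at hzip ⊢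
        rw [show ((0 : Nat) :: (0 + 1) :: (bBreaks g (q :: l') ++ [l'.length + 1]).map (· + 1)).zip
              ((0 + 1) :: (bBreaks g (q :: l') ++ [l'.length + 1]).map (· + 1)) =
            ((0 : Nat), 0 + 1) ::
              (((0 + 1) :: (bBreaks g (q :: l') ++ [l'.length + 1]).map (· + 1)).zip
                ((bBreaks g (q :: l') ++ [(q :: l').length]).map (· + 1))) from rfl]
        simp only [List.map_cons]
        exact congrArg₂ List.cons rfl hzip
      rw [hb, setStart, ← bSegments_head g q l', ih q q]
      simp only [segs, if_pos hgap]
    · -- no break: same segments as for q::l' except the first start becomes p0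
      have hb : bSegments g (p0 :: q :: l') = setStart p0 (bSegments g (q :: l')) := by
        unfold bSegments
        rw [bBreaks_cons, if_neg hgap]
        simp only [List.nil_append, List.length_cons]
        rw [hmap]
        cases hcT : bBreaks g (q :: l') ++ [l'.length + 1] with
        | nil => simp at hcT
        | cons c T =>
          have hc1 : 1 ≤ c := hall c (by rw [hcT]; exact List.mem_cons_self ..)
          have hT1 : ∀ b ∈ (c :: T).tail, 1 ≤ b := by
            intro b hb
            exact hall b (by rw [hcT]; exact List.mem_cons_of_mem _ hb)
          have hzip := zipmap_shift p0 (q :: l') (c :: T) hT1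
          simp only [List.map_cons, List.tail_cons] at hzip ⊢
          rw [show ((0 : Nat) :: (c + 1) :: T.map (· + 1)).zip
                ((c + 1) :: T.map (· + 1)) =
              ((0 : Nat), c + 1) :: (((c + 1) :: T.map (· + 1)).zip (T.map (· + 1))) from rfl]
          rw [show ((0 : Nat) :: c :: T).zip (c :: T) =
              ((0 : Nat), c) :: ((c :: T).zip T) from rfl]
          simp only [List.map_cons]
          rw [hzip]
          obtain ⟨d, rfl⟩ := Nat.exists_eq_add_of_le' hc1
          simp [setStart, List.getD]
      rw [hb, setStart_setStart, ih q s]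
      simp only [segs, if_neg hgap]

-- ===== VERDICT (by name: the statement is the Claim_ definition above) =====
theorem get_condition_segments_spec : Claim_equal_get_condition_segments := by
  intro markers condition sfreq_raw _
  unfold Spec_get_condition_segments get_condition_segments get_condition_segments_alt
  simp only []
  cases hpos : (markers.filter (fun m => decide (m.1 = if condition = "EO" then "S210" else "S200"))).map Prod.snd with
  | nil => simp
  | cons p0 rest =>
    simp only [List.isEmpty_cons, Bool.false_eq_true, if_false]
    have hA := foldA (10 * sfreq_raw) rest [] p0 p0
    simp only [List.nil_append] at hA
    rw [hA, ← bSegments_segs (10 * sfreq_raw) rest p0 p0, bSegments_head]
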